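-- pv_equiv track=rewrite | github.com/Waffieu/Nyxie-Protogen-Chatbot-Telegram-v10 | free_will.py | _are_terms_related
-- ===== SOURCE A (Python) =====
-- def _are_terms_related(term1, term2):
--     """Determine if two terms are semantically related"""
--     # This is a simplified relationship check
--     # In a real implementation, use word embeddings or a knowledge graph
--
--     # Direct containment
--     if term1.lower() in term2.lower() or term2.lower() in term1.lower():
--         return True
--
--     # Known relationships (hardcoded for demonstration)
--     relationships = {
--         "code": ["program", "software", "development", "programming", "computer"],
--         "music": ["song", "melody", "rhythm", "artist", "band", "concert"],
--         "film": ["movie", "cinema", "actor", "director", "hollywood"],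
--         "ai": ["artificial intelligence", "machine learning", "neural network", "algorithm", "robot"],
--         "game": ["play", "gaming", "entertainment", "fun", "strategy"],
--         # Add more relationships as needed
--     }
--
--     # Check if terms are related through known relationships
--     term1_lower = term1.lower()
--     term2_lower = term2.lower()
--
--     for key, related_terms in relationships.items():
--         if (term1_lower == key or term1_lower in related_terms) and (term2_lower == key or term2_lower in related_terms):
--             return True
--
--     return False
-- ===== SOURCE B (Python) =====
-- _RELATIONSHIPS = {
--     "code": ["program", "software", "development", "programming", "computer"],
--     "music": ["song", "melody", "rhythm", "artist", "band", "concert"],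
--     "film": ["movie", "cinema", "actor", "director", "hollywood"],
--     "ai": ["artificial intelligence", "machine learning", "neural network", "algorithm", "robot"],
--     "game": ["play", "gaming", "entertainment", "fun", "strategy"],
-- }
--
-- # Inverted index built once: each group key maps to itself, each related term maps to its key.
-- _WORD_TO_GROUP = {}
-- for _key, _terms in _RELATIONSHIPS.items():
--     _WORD_TO_GROUP[_key] = _key
--     for _t in _terms:
--         _WORD_TO_GROUP[_t] = _key
--
--
-- def _are_terms_related(term1, term2):
--     """Determine if two terms are semantically related"""
--     t1 = term1.lower()
--     t2 = term2.lower()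
--     # Direct containment
--     if t1 in t2 or t2 in t1:
--         return True
--     # Two lookups in the inverted index instead of scanning the groups
--     g1 = _WORD_TO_GROUP.get(t1)
--     return g1 is not None and g1 == _WORD_TO_GROUP.get(t2)
-- ===== Notes on version B (the rewrite author's own statement) =====
-- stated objective: idiomatic
-- what changed: Replaced the per-group scan (loop over the relationships dict testing membership of both terms in each group) by an inverted index built once that maps every key and related term to its group key, so the check becomes two dict lookups and an equality compare after the unchanged containment guard.
import Mathlib
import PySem

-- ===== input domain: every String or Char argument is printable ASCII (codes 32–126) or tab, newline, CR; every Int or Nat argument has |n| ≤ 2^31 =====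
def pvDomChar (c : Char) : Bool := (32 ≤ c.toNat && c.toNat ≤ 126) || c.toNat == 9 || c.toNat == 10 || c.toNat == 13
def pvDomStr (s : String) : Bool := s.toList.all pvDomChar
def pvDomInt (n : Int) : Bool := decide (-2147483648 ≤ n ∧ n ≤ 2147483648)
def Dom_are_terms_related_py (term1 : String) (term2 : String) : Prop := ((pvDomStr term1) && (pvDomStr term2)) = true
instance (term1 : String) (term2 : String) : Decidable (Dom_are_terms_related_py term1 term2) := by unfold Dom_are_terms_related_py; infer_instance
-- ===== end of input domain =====

-- B replaces A's per-group scan by an inverted index (word -> group key) built once and two lookups; same return value.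

-- ===== PORT A =====
def pvGroups : List (String × List String) :=
  [("code", ["program", "software", "development", "programming", "computer"]),
   ("music", ["song", "melody", "rhythm", "artist", "band", "concert"]),
   ("film", ["movie", "cinema", "actor", "director", "hollywood"]),
   ("ai", ["artificial intelligence", "machine learning", "neural network", "algorithm", "robot"]),
   ("game", ["play", "gaming", "entertainment", "fun", "strategy"])]

-- the for-loop over relationships.items() with early return
def pvLoopA (t1 t2 : String) : List (String × List String) → Bool
  | [] => false
  | kv :: rest =>
    if ((t1 == kv.1 || kv.2.contains t1) && (t2 == kv.1 || kv.2.contains t2)) then true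
    else pvLoopA t1 t2 rest

def are_terms_related_py (term1 : String) (term2 : String) : Bool :=
  if PySem.Str.isIn (PySem.Str.lower term1) (PySem.Str.lower term2)
     || PySem.Str.isIn (PySem.Str.lower term2) (PySem.Str.lower term1) then true
  else
    pvLoopA (PySem.Str.lower term1) (PySem.Str.lower term2) pvGroups

-- ===== PORT B =====
-- the inverted index built once from the same table (Source B's module-level loop)
def pvWordToGroup : PySem.Dict String String :=
  pvGroups.foldl
    (fun d kv => kv.2.foldl (fun d w => d.insert w kv.1) (d.insert kv.1 kv.1))
    PySem.Dict.empty

-- 'g1 = _WORD_TO_GROUP.get(t1); return g1 is not None and g1 == _WORD_TO_GROUP.get(t2)'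
def pvLookup2 (t1 t2 : String) : Bool :=
  match pvWordToGroup.get? t1 with
  | none => false
  | some g1 => some g1 == pvWordToGroup.get? t2

def are_terms_related_py_alt (term1 : String) (term2 : String) : Bool :=
  if PySem.Str.isIn (PySem.Str.lower term1) (PySem.Str.lower term2)
     || PySem.Str.isIn (PySem.Str.lower term2) (PySem.Str.lower term1) then true
  else
    pvLookup2 (PySem.Str.lower term1) (PySem.Str.lower term2)

-- ===== PRECONDITION & SPEC =====
def Spec_are_terms_related_py (term1 : String) (term2 : String) (out : Bool) : Prop := out = are_terms_related_py_alt term1 term2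
instance (term1 : String) (term2 : String) (out : Bool) : Decidable (Spec_are_terms_related_py term1 term2 out) := by unfold Spec_are_terms_related_py; infer_instance

-- ===== CLAIM (what is proved, stated in full; the proofs are below) =====
def Claim_equal_are_terms_related_py : Prop := ∀ (term1 : String) (term2 : String), Dom_are_terms_related_py term1 term2 → Spec_are_terms_related_py term1 term2 (are_terms_related_py term1 term2)

-- ===== LEMMAS AND PROOFS =====

-- 's matches group kv' (s is the key or one of the related terms), as A's loop tests it
def pvMemG (s : String) (kv : String × List String) : Bool := s == kv.1 || kv.2.contains s

-- all words of a group, key first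
def pvWords (kv : String × List String) : List String := kv.1 :: kv.2

lemma pvMemG_iff (s : String) (kv : String × List String) :
    pvMemG s kv = true ↔ s ∈ pvWords kv := by
  simp [pvMemG, pvWords]

-- A's loop is an 'any' over the groups
lemma pvLoop_any (t1 t2 : String) (gs : List (String × List String)) :
    pvLoopA t1 t2 gs = gs.any (fun kv => pvMemG t1 kv && pvMemG t2 kv) := by
  induction gs with
  | nil => rfl
  | cons kv rest ih =>
    rw [List.any_cons, ← ih]
    show (if (pvMemG t1 kv && pvMemG t2 kv) = true then true else pvLoopA t1 t2 rest) = _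
    cases hc : (pvMemG t1 kv && pvMemG t2 kv) <;> simp [hc] <;> rfl

-- a fold of inserts all carrying the same value k
lemma pvIns_get? (ws : List String) (k : String) (d : PySem.Dict String String) (s : String) :
    (ws.foldl (fun d w => d.insert w k) d).get? s = if s ∈ ws then some k else d.get? s := by
  induction ws generalizing d with
  | nil => simp
  | cons w ws ih =>
    simp only [List.foldl_cons, ih, PySem.Dict.get?_insert, List.mem_cons]
    by_cases h : s ∈ ws <;> by_cases h2 : s = w <;> simp [h, h2]

-- one group step of the index build
lemma pvStep_get? (kv : String × List String) (d : PySem.Dict String String) (s : String) :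
    (kv.2.foldl (fun d w => d.insert w kv.1) (d.insert kv.1 kv.1)).get? s
      = if pvMemG s kv then some kv.1 else d.get? s := by
  rw [pvIns_get?]
  by_cases h : s ∈ kv.2 <;> by_cases h2 : s = kv.1 <;>
    simp [h, h2, pvMemG, PySem.Dict.get?_insert]

-- if s matches no group, the build leaves s's entry alone
lemma pvFold_get?_none (gs : List (String × List String)) (d : PySem.Dict String String) (s : String)
    (h : ∀ kv ∈ gs, pvMemG s kv = false) :
    (gs.foldl (fun d kv => kv.2.foldl (fun d w => d.insert w kv.1) (d.insert kv.1 kv.1)) d).get? s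
      = d.get? s := by
  induction gs generalizing d with
  | nil => rfl
  | cons kv rest ih =>
    simp only [List.foldl_cons]
    rw [ih _ (fun kv' h' => h kv' (List.mem_cons_of_mem _ h')), pvStep_get?,
        if_neg (by simp [h kv (List.mem_cons_self)])]

-- if s matches a group and every matching group has the same key, get? returns that key
lemma pvFold_get?_some (gs : List (String × List String)) :
    ∀ (d : PySem.Dict String String) (s : String) (kv : String × List String), kv ∈ gs →
      pvMemG s kv = true → (∀ kv' ∈ gs, pvMemG s kv' = true → kv'.1 = kv.1) →
      (gs.foldl (fun d kv => kv.2.foldl (fun d w => d.insert w kv.1) (d.insert kv.1 kv.1)) d).get? s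
        = some kv.1 := by
  induction gs with
  | nil => intro _ _ _ h; cases h
  | cons kv0 rest ih =>
    intro d s kv hmem hm huniq
    simp only [List.foldl_cons]
    by_cases hex : ∃ kv' ∈ rest, pvMemG s kv' = true
    · obtain ⟨kv', hkv', hm'⟩ := hex
      have e' : kv'.1 = kv.1 := huniq kv' (List.mem_cons_of_mem _ hkv') hm'
      rw [ih _ s kv' hkv' hm'
          (fun kv'' h'' hm'' => by
            rw [huniq kv'' (List.mem_cons_of_mem _ h'') hm'', e'])]
      rw [e']
    · push_neg at hex
      have hall : ∀ kv' ∈ rest, pvMemG s kv' = false := by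
        intro kv' h'
        exact Bool.eq_false_iff.mpr (hex kv' h')
      rw [pvFold_get?_none rest _ s hall, pvStep_get?]
      have hm0 : pvMemG s kv0 = true := by
        rcases List.mem_cons.mp hmem with e | h'
        · exact e ▸ hm
        · exact absurd hm (by simp [hall kv h'])
      rw [if_pos hm0, huniq kv0 List.mem_cons_self hm0]

-- disjointness of the groups' word lists (checked on the literal table)
lemma pvDisj : pvGroups.Pairwise (fun a b => ∀ x ∈ pvWords a, x ∉ pvWords b) := by
  decide

-- under pairwise disjointness, a word pins down its group
lemma pvUniq_gen (gs : List (String × List String))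
    (hp : gs.Pairwise (fun a b => ∀ x ∈ pvWords a, x ∉ pvWords b)) :
    ∀ (s : String) (kv kv' : String × List String), kv ∈ gs → kv' ∈ gs →
      s ∈ pvWords kv → s ∈ pvWords kv' → kv = kv' := by
  induction gs with
  | nil => intro _ _ _ h; cases h
  | cons a rest ih =>
    intro s kv kv' hkv hkv' hs hs'
    rcases List.pairwise_cons.mp hp with ⟨hhead, htail⟩
    rcases List.mem_cons.mp hkv with e | h <;> rcases List.mem_cons.mp hkv' with e' | h'
    · rw [e, e']
    · exact absurd (e ▸ hs) (fun hx => hhead kv' h' s hx hs')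
    · exact absurd (e' ▸ hs') (fun hx => hhead kv h s hx hs)
    · exact ih htail s kv kv' h h' hs hs'

lemma pvUniq (s : String) (kv : String × List String) (hkv : kv ∈ pvGroups)
    (hm : pvMemG s kv = true) :
    ∀ kv' ∈ pvGroups, pvMemG s kv' = true → kv'.1 = kv.1 := by
  intro kv' hkv' hm'
  rw [pvUniq_gen pvGroups pvDisj s kv' kv hkv' hkv (pvMemG_iff s kv' |>.mp hm')
      (pvMemG_iff s kv |>.mp hm)]

-- the keys of the literal table are distinct
lemma pvKeysNodup : (pvGroups.map Prod.fst).Nodup := by decide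

lemma pvKeyInj (kv kv' : String × List String) (h : kv ∈ pvGroups) (h' : kv' ∈ pvGroups)
    (he : kv.1 = kv'.1) : kv = kv' :=
  List.inj_on_of_nodup_map pvKeysNodup h h' he

-- the scan over the groups equals the two index lookups
lemma pvCore (t1 t2 : String) : pvLoopA t1 t2 pvGroups = pvLookup2 t1 t2 := by
  rw [pvLoop_any, pvLookup2]
  by_cases h1 : ∃ kv ∈ pvGroups, pvMemG t1 kv = true
  · obtain ⟨kv, hkv, hm1⟩ := h1
    have g1 : pvWordToGroup.get? t1 = some kv.1 :=
      pvFold_get?_some pvGroups PySem.Dict.empty t1 kv hkv hm1 (pvUniq t1 kv hkv hm1)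
    rw [g1]
    by_cases h2 : ∃ kv' ∈ pvGroups, pvMemG t2 kv' = true
    · obtain ⟨kv', hkv', hm2⟩ := h2
      have g2 : pvWordToGroup.get? t2 = some kv'.1 :=
        pvFold_get?_some pvGroups PySem.Dict.empty t2 kv' hkv' hm2 (pvUniq t2 kv' hkv' hm2)
      rw [g2]
      by_cases he : kv.1 = kv'.1
      · have : kv = kv' := pvKeyInj kv kv' hkv hkv' he
        subst this
        have : pvGroups.any (fun kv0 => pvMemG t1 kv0 && pvMemG t2 kv0) = true :=
          List.any_eq_true.mpr ⟨kv, hkv, by simp [hm1, hm2]⟩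
        simp [this, he]
      · have : pvGroups.any (fun kv0 => pvMemG t1 kv0 && pvMemG t2 kv0) = false := by
          rw [List.any_eq_false]
          intro kv0 h0
          simp only [Bool.and_eq_true, not_and]
          intro hm1'
          have e1 : kv0.1 = kv.1 := pvUniq t1 kv hkv hm1 kv0 h0 hm1'
          intro hm2'
          have e2 : kv0.1 = kv'.1 := pvUniq t2 kv' hkv' hm2 kv0 h0 hm2'
          exact he (e1 ▸ e2)
        simp [this, he]
    · push_neg at h2
      have g2 : pvWordToGroup.get? t2 = PySem.Dict.empty.get? t2 :=
        pvFold_get?_none pvGroups PySem.Dict.empty t2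
          (fun kv' h' => Bool.eq_false_iff.mpr (h2 kv' h'))
      rw [g2, PySem.Dict.get?_empty]
      have : pvGroups.any (fun kv0 => pvMemG t1 kv0 && pvMemG t2 kv0) = false := by
        rw [List.any_eq_false]
        intro kv0 h0
        simp [Bool.eq_false_iff.mpr (h2 kv0 h0)]
      simp [this]
  · push_neg at h1
    have g1 : pvWordToGroup.get? t1 = PySem.Dict.empty.get? t1 :=
      pvFold_get?_none pvGroups PySem.Dict.empty t1
        (fun kv' h' => Bool.eq_false_iff.mpr (h1 kv' h'))
    rw [g1, PySem.Dict.get?_empty]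
    have : pvGroups.any (fun kv0 => pvMemG t1 kv0 && pvMemG t2 kv0) = false := by
      rw [List.any_eq_false]
      intro kv0 h0
      simp [Bool.eq_false_iff.mpr (h1 kv0 h0)]
    simp [this]

-- ===== VERDICT (by name: the statement is the Claim_ definition above) =====
theorem are_terms_related_py_spec : Claim_equal_are_terms_related_py := by
  intro term1 term2 _
  unfold Spec_are_terms_related_py are_terms_related_py are_terms_related_py_alt
  split_ifs
  · rfl
  · exact pvCore _ _
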